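-- pv_equiv track=rewrite | github.com/Palomaxie/week4Challenge | app.py | we
-- ===== SOURCE A (Python) =====
-- def we(e):
--     news_dict = {'new_source': {1: {'BBC': 'bbc-news'}, 2: {'CNN': 'cnn'}, 3:     {'News24': 'news24'}, 4:
--                                 {'Fox News': 'fox'}}}
--     for k, v in news_dict.items():
--         if type(v) == dict:
--             for k, v in v.items():
--                 for k, v in v.items():
--                     if k == e:
--                         return v
-- ===== SOURCE B (Python) =====
-- def we(e):
--     mapping = {'BBC': 'bbc-news', 'CNN': 'cnn', 'News24': 'news24', 'Fox News': 'fox'}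
--     return mapping.get(e)
-- ===== Notes on version B (the rewrite author's own statement) =====
-- stated objective: simpler
-- what changed: Replaced the three nested dict loops and the type(v)==dict guard with one flat name->slug dictionary and a single .get lookup.
import Mathlib
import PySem

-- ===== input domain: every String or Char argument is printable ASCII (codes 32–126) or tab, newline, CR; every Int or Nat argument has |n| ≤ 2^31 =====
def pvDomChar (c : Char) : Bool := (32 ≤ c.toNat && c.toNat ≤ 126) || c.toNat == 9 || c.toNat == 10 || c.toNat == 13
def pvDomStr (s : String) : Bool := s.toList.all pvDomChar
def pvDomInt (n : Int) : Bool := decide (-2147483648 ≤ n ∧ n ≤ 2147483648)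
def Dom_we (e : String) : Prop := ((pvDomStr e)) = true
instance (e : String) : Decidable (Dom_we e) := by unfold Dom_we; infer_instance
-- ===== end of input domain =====

-- B replaces A's three nested dict loops and type check by one flat name→slug dict and a single lookup (simpler).

-- ===== PORT A =====
-- innermost loop: for k, v in v.items(): if k == e: return v
def weLoop3 (e : String) (kvs : List (String × String)) : Option String :=
  match kvs with
  | [] => none
  | (k, v) :: rest => if k == e then some v else weLoop3 e rest

-- middle loop over the Int-keyed dict
def weLoop2 (e : String) (kvs : List (Int × PySem.Dict String String)) : Option String :=
  match kvs with
  | [] => none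
  | (_, v) :: rest =>
    match weLoop3 e v.items with
    | some r => some r
    | none => weLoop2 e rest

-- outer loop; type(v) == dict is always true for the literal, kept as a constant-true branch
def weLoop1 (e : String) (kvs : List (String × PySem.Dict Int (PySem.Dict String String))) : Option String :=
  match kvs with
  | [] => none
  | (_, v) :: rest =>
    if true then
      match weLoop2 e v.items with
      | some r => some r
      | none => weLoop1 e rest
    else weLoop1 e rest

def we (e : String) : Option String :=
  let news_dict : PySem.Dict String (PySem.Dict Int (PySem.Dict String String)) :=
    PySem.Dict.mk [("new_source", PySem.Dict.mk
      [(1, PySem.Dict.mk [("BBC", "bbc-news")]), (2, PySem.Dict.mk [("CNN", "cnn")]),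
       (3, PySem.Dict.mk [("News24", "news24")]), (4, PySem.Dict.mk [("Fox News", "fox")])])]
  weLoop1 e news_dict.items

-- ===== PORT B =====
def we_alt (e : String) : Option String :=
  let mapping : PySem.Dict String String :=
    PySem.Dict.mk [("BBC", "bbc-news"), ("CNN", "cnn"), ("News24", "news24"), ("Fox News", "fox")]
  PySem.Dict.get? mapping e

-- ===== PRECONDITION & SPEC =====
def Spec_we (e : String) (out : Option String) : Prop := out = we_alt e
instance (e : String) (out : Option String) : Decidable (Spec_we e out) := by unfold Spec_we; infer_instance

-- ===== CLAIM (what is proved, stated in full; the proofs are below) =====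
def Claim_equal_we : Prop := ∀ (e : String), Dom_we e → Spec_we e (we e)

-- ===== LEMMAS AND PROOFS =====

-- ===== VERDICT (by name: the statement is the Claim_ definition above) =====
theorem we_spec : Claim_equal_we := by
  intro e _
  unfold Spec_we we we_alt
  by_cases h1 : "BBC" == e <;> by_cases h2 : "CNN" == e <;>
    by_cases h3 : "News24" == e <;> by_cases h4 : "Fox News" == e <;>
    simp_all [weLoop1, weLoop2, weLoop3, PySem.Dict.get?]
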